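-- pv_equiv track=rewrite | github.com/oernster/latencylab | latencylab_ui/outputs_view.py | _format_critical_path_for_display
-- ===== SOURCE A (Python) =====
-- def _format_critical_path_for_display(text: str) -> str:
--     """Format a critical-path string for readability in a narrow text box.
--
--     Deterministic, v1 UI-only behavior:
--     - Insert line breaks after: '>', ',', ')'
--     - Collapse accidental whitespace around inserted breaks
--
--     The underlying model/run output remains unchanged (tooltips/exports still use
--     the original strings).
--     """
--
--     # Insert breaks deterministically. We avoid splitting the common arrow token
--     # "->" because it reads better on a single line.
--     chars = list(text)
--     out_parts: list[str] = []
--     for i, ch in enumerate(chars):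
--         out_parts.append(ch)
--         if ch == ">":
--             # Don't break inside "->".
--             if i > 0 and chars[i - 1] == "-":
--                 continue
--             out_parts.append("\n")
--         elif ch in (",", ")"):
--             out_parts.append("\n")
--
--     out = "".join(out_parts)
--
--     # Normalize whitespace around newlines deterministically.
--     lines = [ln.strip() for ln in out.splitlines()]
--     # Preserve intentional blank lines (unlikely in critical paths, but safe).
--     return "\n".join(lines)
-- ===== SOURCE B (Python) =====
-- def _format_critical_path_for_display(text: str) -> str:
--     # Split/join algorithm: protect the arrow token by splitting the text on
--     # "->", then within each piece insert breaks by splitting on each break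
--     # char and re-joining with "char\n"; finally re-join pieces with "->" and
--     # normalize whitespace line by line.
--     def _break_after(s: str, ch: str) -> str:
--         return (ch + "\n").join(s.split(ch))
--
--     pieces = [
--         _break_after(_break_after(_break_after(p, ">"), ","), ")")
--         for p in text.split("->")
--     ]
--     broken = "->".join(pieces)
--     return "\n".join(ln.strip() for ln in broken.splitlines())
-- ===== Notes on version B (the rewrite author's own statement) =====
-- stated objective: faster
-- what changed: A's per-character loop with a previous-character lookup is replaced by a split/join algorithm: the text is split on the protected arrow token, breaks are inserted inside each piece by splitting on each break character and re-joining with that character plus a line break, the pieces are re-joined with the arrow token, and the same line-strip normalization follows.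
import Mathlib
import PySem

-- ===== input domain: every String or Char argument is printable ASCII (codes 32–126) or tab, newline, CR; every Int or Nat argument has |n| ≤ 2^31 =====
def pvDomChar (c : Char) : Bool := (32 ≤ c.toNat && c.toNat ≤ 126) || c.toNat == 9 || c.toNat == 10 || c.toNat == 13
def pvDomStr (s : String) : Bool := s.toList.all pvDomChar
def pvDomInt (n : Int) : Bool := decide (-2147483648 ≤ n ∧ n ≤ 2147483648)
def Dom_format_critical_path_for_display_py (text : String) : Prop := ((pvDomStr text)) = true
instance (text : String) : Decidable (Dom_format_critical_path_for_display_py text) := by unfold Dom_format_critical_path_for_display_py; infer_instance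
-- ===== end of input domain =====

-- B replaces A's per-character loop (enumerate + chars[i-1] lookup) by a split/join
-- algorithm: split on the protected arrow token, insert breaks via split/re-join on
-- each break char inside each piece, then re-join the pieces — objective: faster
-- (measured constant-factor: bulk split/join instead of a per-character loop).

-- ===== PORT A =====
-- literal port: loop over enumerate(chars), append ch, then conditional '\n' with the
-- chars[i-1] lookup (guarded by i > 0, as in the Python 'and' short-circuit)
def format_critical_path_for_display_py (text : String) : String :=
  let chars := text.toList
  let out_parts : List Char :=
    (PySem.List.enumerate chars).foldl (fun acc (p : Int × Char) =>
      let acc := acc ++ [p.2]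
      if p.2 = '>' then
        if p.1 > 0 ∧ PySem.List.pyGet? chars (p.1 - 1) = some '-' then acc
        else acc ++ ['\n']
      else if p.2 = ',' ∨ p.2 = ')' then acc ++ ['\n']
      else acc) []
  let lines := (PySem.Chars.splitlines out_parts).map PySem.Chars.strip
  String.ofList (PySem.Chars.join ['\n'] lines)

-- ===== PORT B =====
-- literal port of Source B's helper: (ch + "\n").join(s.split(ch))
def pvBreakAfter (s : List Char) (ch : Char) : List Char :=
  PySem.Chars.join [ch, '\n'] (PySem.Chars.splitOn s [ch])

-- literal port of Source B: split on "->", break after '>', ',', ')' inside each piece,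
-- re-join with "->", then the same normalization
def format_critical_path_for_display_py_alt (text : String) : String :=
  let pieces := (PySem.Chars.splitOn text.toList ['-', '>']).map
    (fun p => pvBreakAfter (pvBreakAfter (pvBreakAfter p '>') ',') ')')
  let broken := PySem.Chars.join ['-', '>'] pieces
  let lines := (PySem.Chars.splitlines broken).map PySem.Chars.strip
  String.ofList (PySem.Chars.join ['\n'] lines)

-- ===== PRECONDITION & SPEC =====
def Spec_format_critical_path_for_display_py (text : String) (out : String) : Prop := out = format_critical_path_for_display_py_alt text
instance (text : String) (out : String) : Decidable (Spec_format_critical_path_for_display_py text out) := by unfold Spec_format_critical_path_for_display_py; infer_instance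

-- ===== CLAIM (what is proved, stated in full; the proofs are below) =====
def Claim_equal_format_critical_path_for_display_py : Prop := ∀ (text : String), Dom_format_critical_path_for_display_py text → Spec_format_critical_path_for_display_py text (format_critical_path_for_display_py text)

-- ===== LEMMAS AND PROOFS =====

-- per-step output of A's loop, as a pure function of (index, char)
def pvGA (chars : List Char) (p : Int × Char) : List Char :=
  if p.2 = '>' then
    if p.1 > 0 ∧ PySem.List.pyGet? chars (p.1 - 1) = some '-' then [p.2]
    else [p.2, '\n']
  else if p.2 = ',' ∨ p.2 = ')' then [p.2, '\n']
  else [p.2]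

-- per-step output as a function of (previous char, char)
def pvGB (p : Char × Char) : List Char :=
  if p.2 = ',' ∨ p.2 = ')' ∨ (p.2 = '>' ∧ p.1 ≠ '-') then [p.2, '\n'] else [p.2]

-- combined per-char expansion performed by B's three break passes
def pvF3 (x : Char) : List Char :=
  if x = '>' ∨ x = ',' ∨ x = ')' then [x, '\n'] else [x]

-- clean structural version of PySem.Chars.splitOn for a nonempty separator c0 :: sep'
def pvSplit (c0 : Char) (sep' : List Char) : List Char → List (List Char)
  | [] => [[]]
  | c :: rest =>
    if (c0 :: sep').isPrefixOf (c :: rest) then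
      [] :: pvSplit c0 sep' (rest.drop sep'.length)
    else
      match pvSplit c0 sep' rest with
      | [] => [[c]]
      | p :: ps => (c :: p) :: ps
termination_by l => l.length
decreasing_by
  · simp
  · simp

theorem pv_foldA (chars : List Char) :
    ∀ (l : List (Int × Char)) (acc : List Char),
      l.foldl (fun acc (p : Int × Char) =>
        let acc := acc ++ [p.2]
        if p.2 = '>' then
          if p.1 > 0 ∧ PySem.List.pyGet? chars (p.1 - 1) = some '-' then acc
          else acc ++ ['\n']
        else if p.2 = ',' ∨ p.2 = ')' then acc ++ ['\n']
        else acc) acc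
      = acc ++ l.flatMap (pvGA chars) := by
  intro l
  induction l with
  | nil => simp
  | cons p l ih =>
    intro acc
    simp only [List.foldl_cons, List.flatMap_cons, ih]
    unfold pvGA
    split_ifs <;> simp

theorem pv_core (chars : List Char) :
    ∀ (cs : List Char) (s : ℕ) (prev : Char),
      chars.drop s = cs →
      (s = 0 → prev ≠ '-') →
      (0 < s → chars[s - 1]? = some prev) →
      (PySem.List.enumerate cs (s : Int)).flatMap (pvGA chars)
        = (List.zip (prev :: cs) cs).flatMap pvGB := by
  intro cs
  induction cs with
  | nil => simp [PySem.List.enumerate]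
  | cons c cs ih =>
    intro s prev hdrop h0 hp
    have hs : chars[s]? = some c := by
      have := congrArg (fun l => l[0]?) hdrop
      simpa using this
    have hdrop' : chars.drop (s + 1) = cs := by
      rw [← List.drop_drop, hdrop]; simp
    have hrec := ih (s + 1) c hdrop' (by omega) (by intro _; simpa using hs)
    simp only [PySem.List.enumerate_cons, List.zip_cons_cons, List.flatMap_cons]
    have hcast : (s : Int) + 1 = ((s + 1 : ℕ) : Int) := by push_cast; ring
    rw [hcast, hrec]
    congr 1
    unfold pvGA pvGB
    by_cases hc : c = '>'
    · subst hc
      have hprev : ((s : Int) > 0 ∧ PySem.List.pyGet? chars ((s : Int) - 1) = some '-')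
          ↔ prev = '-' := by
        constructor
        · rintro ⟨hpos, hget⟩
          have hs0 : 0 < s := by exact_mod_cast hpos
          have : ((s : Int) - 1) = ((s - 1 : ℕ) : Int) := by omega
          rw [this, PySem.List.pyGet?_natCast] at hget
          have := hp hs0
          rw [this] at hget
          exact (Option.some.injEq _ _ ▸ hget).symm ▸ rfl
        · intro hpm
          rcases Nat.eq_zero_or_pos s with h | h
          · exact absurd hpm (h0 h)
          · refine ⟨by exact_mod_cast h, ?_⟩
            have : ((s : Int) - 1) = ((s - 1 : ℕ) : Int) := by omega
            rw [this, PySem.List.pyGet?_natCast, hp h, hpm]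
      by_cases hpm : prev = '-'
      · simp [hpm]
        exact ⟨by exact_mod_cast (hprev.mpr hpm).1, (hprev.mpr hpm).2⟩
      · simp [hpm]
        intro hpos hget
        exact hpm (hprev.mp ⟨by exact_mod_cast hpos, hget⟩)
    · by_cases hcp : c = ',' ∨ c = ')' <;> simp [hc, hcp]

-- pvSplit never returns []
theorem pv_split_ne_nil (c0 : Char) (sep' : List Char) (l : List Char) :
    pvSplit c0 sep' l ≠ [] := by
  cases l with
  | nil => simp [pvSplit]
  | cons c rest =>
    rw [pvSplit]
    split
    · simp
    · cases pvSplit c0 sep' rest <;> simp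

-- splitOn.go agrees with pvSplit
theorem pv_go_eq (c0 : Char) (sep' : List Char) :
    ∀ (fuel : ℕ) (l : List Char), l.length ≤ fuel → ∀ (cur : List Char) (acc : List (List Char)),
      PySem.Chars.splitOn.go (c0 :: sep') fuel l cur acc
        = acc.reverse ++ List.modifyHead (cur.reverse ++ ·) (pvSplit c0 sep' l) := by
  intro fuel
  induction fuel with
  | zero =>
    intro l hl cur acc
    have hnil : l = [] := List.eq_nil_of_length_eq_zero (Nat.le_zero.mp hl)
    subst hnil
    rw [PySem.Chars.splitOn.go]
    simp [pvSplit]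
  | succ f ih =>
    intro l hl cur acc
    cases l with
    | nil =>
      rw [PySem.Chars.splitOn.go]
      · simp [pvSplit]
      · omega
    | cons c rest =>
      rw [PySem.Chars.splitOn.go]
      by_cases hpre : (c0 :: sep').isPrefixOf (c :: rest)
      · rw [if_pos hpre]
        have hlen : ((c :: rest).drop (c0 :: sep').length).length ≤ f := by
          simp only [List.length_drop, List.length_cons]
          have : rest.length ≤ f := by simpa using hl
          omega
        rw [ih _ hlen]
        rw [pvSplit, if_pos hpre]
        simp only [List.length_cons, List.drop_succ_cons, List.reverse_nil, List.nil_append,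
]
        cases pvSplit c0 sep' (rest.drop sep'.length) <;> simp
      · rw [if_neg hpre]
        have hlen : rest.length ≤ f := by
          simpa using hl
        rw [ih _ hlen]
        rw [pvSplit, if_neg hpre]
        have hne := pv_split_ne_nil c0 sep' rest
        cases hsp : pvSplit c0 sep' rest with
        | nil => exact absurd hsp hne
        | cons p ps => simp

theorem pv_splitOn_eq (c0 : Char) (sep' : List Char) (l : List Char) :
    PySem.Chars.splitOn l (c0 :: sep') = pvSplit c0 sep' l := by
  unfold PySem.Chars.splitOn
  rw [pv_go_eq c0 sep' (l.length + 1) l (by omega)]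
  cases hsp : pvSplit c0 sep' l with
  | nil => exact absurd hsp (pv_split_ne_nil c0 sep' l)
  | cons p ps => simp


-- join over a head with a prepended segment
theorem pv_join_head (sep xs q : List Char) (qs : List (List Char)) :
    PySem.Chars.join sep ((xs ++ q) :: qs) = xs ++ PySem.Chars.join sep (q :: qs) := by
  cases qs with
  | nil => simp [PySem.Chars.join_singleton]
  | cons r rs =>
    rw [PySem.Chars.join_cons_cons, PySem.Chars.join_cons_cons]
    simp [List.append_assoc]

-- single-char break pass = per-char flatMap
theorem pv_breakAfter_eq (c : Char) (l : List Char) :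
    pvBreakAfter l c = l.flatMap (fun x => if x = c then [c, '\n'] else [x]) := by
  unfold pvBreakAfter
  rw [pv_splitOn_eq c []]
  induction l with
  | nil => simp [pvSplit, PySem.Chars.join_singleton]
  | cons x rest ih =>
    rw [pvSplit]
    by_cases hx : x = c
    · subst hx
      rw [if_pos (by simp [List.isPrefixOf])]
      simp only [List.length_nil, List.drop_zero]
      cases hsp : pvSplit x [] rest with
      | nil => exact absurd hsp (pv_split_ne_nil x [] rest)
      | cons p ps =>
        rw [hsp] at ih
        rw [PySem.Chars.join_cons_cons]
        simp [← ih]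
    · rw [if_neg (by simp [List.isPrefixOf]; intro h; exact absurd h.symm hx)]
      cases hsp : pvSplit c [] rest with
      | nil => exact absurd hsp (pv_split_ne_nil c [] rest)
      | cons p ps =>
        rw [hsp] at ih
        rw [show (match p :: ps with
              | [] => [[x]]
              | p :: ps => (x :: p) :: ps) = (x :: p) :: ps from rfl]
        rw [show (x :: p) = [x] ++ p from rfl, pv_join_head [c, '\n'] [x] p ps, ih]
        simp [hx]

-- three passes compose to pvF3
theorem pv_three_eq (p : List Char) :
    pvBreakAfter (pvBreakAfter (pvBreakAfter p '>') ',') ')' = p.flatMap pvF3 := by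
  rw [pv_breakAfter_eq, pv_breakAfter_eq, pv_breakAfter_eq, List.flatMap_assoc,
    List.flatMap_assoc]
  apply List.flatMap_congr
  intro x _
  unfold pvF3
  by_cases h1 : x = '>'
  · subst h1; simp
  · by_cases h2 : x = ','
    · subst h2; simp
    · by_cases h3 : x = ')'
      · subst h3; simp
      · simp [h1, h2, h3]

-- pvGB with a known-safe previous char is pvF3
theorem pv_gb_eq_f3 (prev c : Char) (h : c = '>' → prev ≠ '-') :
    pvGB (prev, c) = pvF3 c := by
  unfold pvGB pvF3
  by_cases h1 : c = '>'
  · subst h1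
    simp [h rfl]
  · by_cases h2 : c = ',' ∨ c = ')' <;> simp [h1, h2]

theorem pv_main_aux : ∀ (n : ℕ) (l : List Char), l.length ≤ n → ∀ (prev : Char),
    ¬ (prev = '-' ∧ l.head? = some '>') →
    PySem.Chars.join ['-', '>'] ((pvSplit '-' ['>'] l).map (fun p => p.flatMap pvF3))
      = (List.zip (prev :: l) l).flatMap pvGB := by
  intro n
  induction n with
  | zero =>
    intro l hl prev _
    have hnil : l = [] := List.eq_nil_of_length_eq_zero (Nat.le_zero.mp hl)
    subst hnil
    simp [pvSplit, PySem.Chars.join_singleton]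
  | succ n ih =>
    intro l hl prev h
    cases l with
    | nil => simp [pvSplit, PySem.Chars.join_singleton]
    | cons c rest =>
      by_cases hpre : (['-', '>'] : List Char).isPrefixOf (c :: rest)
      · -- the "->" token: c = '-' and rest starts with '>'
        cases rest with
        | nil => simp [List.isPrefixOf] at hpre
        | cons c2 rest' =>
          have hp2 := hpre
          simp [List.isPrefixOf] at hp2
          obtain ⟨hc, hc2⟩ := hp2
          subst hc; subst hc2
          rw [pvSplit, if_pos hpre]
          simp only [List.length_cons, List.length_nil, List.drop_succ_cons, List.drop_zero]
          cases hsp : pvSplit '-' ['>'] rest' with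
          | nil => exact absurd hsp (pv_split_ne_nil '-' ['>'] rest')
          | cons q qs =>
            have hrec := ih rest' (by simp at hl; omega) '>'
              (by rintro ⟨h1, _⟩; exact absurd h1 (by decide))
            rw [hsp] at hrec
            simp only [List.map_cons, List.flatMap_nil]
            rw [PySem.Chars.join_cons_cons]
            rw [show (List.map (fun p => p.flatMap pvF3) (q :: qs))
                  = (q.flatMap pvF3) :: (qs.map (fun p => p.flatMap pvF3)) from rfl] at hrec
            rw [hrec]
            rw [List.zip_cons_cons, List.flatMap_cons, List.zip_cons_cons, List.flatMap_cons]
            rw [show pvGB (prev, '-') = ['-'] by simp [pvGB]]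
            rw [show pvGB ('-', '>') = ['>'] by simp [pvGB]]
            simp
      · -- ordinary char: peel c off the head piece
        rw [pvSplit, if_neg hpre]
        cases hsp : pvSplit '-' ['>'] rest with
        | nil => exact absurd hsp (pv_split_ne_nil '-' ['>'] rest)
        | cons p ps =>
          have hH : ¬ (c = '-' ∧ rest.head? = some '>') := by
            rintro ⟨hc, hh⟩
            cases rest with
            | nil => simp at hh
            | cons c2 rest' =>
              simp at hh
              exact hpre (by simp [List.isPrefixOf, hc, hh])
          have hrec := ih rest (by simpa using hl) c hH
          rw [hsp] at hrec
          simp only [List.map_cons]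
          rw [show ((c :: p).flatMap pvF3) = pvF3 c ++ p.flatMap pvF3 by simp]
          rw [pv_join_head ['-', '>'] (pvF3 c) (p.flatMap pvF3) (ps.map (fun p => p.flatMap pvF3))]
          rw [show (List.map (fun p => p.flatMap pvF3) (p :: ps))
                = (p.flatMap pvF3) :: (ps.map (fun p => p.flatMap pvF3)) from rfl] at hrec
          rw [hrec]
          rw [List.zip_cons_cons, List.flatMap_cons]
          congr 1
          exact (pv_gb_eq_f3 prev c (fun hc hpm => h ⟨hpm, by simp [hc]⟩)).symm

-- B's split/flatMap/join equals the prev-pairing flatMap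
theorem pv_main (l : List Char) (prev : Char) :
    ¬ (prev = '-' ∧ l.head? = some '>') →
    PySem.Chars.join ['-', '>'] ((pvSplit '-' ['>'] l).map (fun p => p.flatMap pvF3))
      = (List.zip (prev :: l) l).flatMap pvGB := by
  exact pv_main_aux l.length l (le_refl _) prev

-- ===== VERDICT (by name: the statement is the Claim_ definition above) =====
theorem format_critical_path_for_display_py_spec : Claim_equal_format_critical_path_for_display_py := by
  intro text _
  unfold Spec_format_critical_path_for_display_py
  unfold format_critical_path_for_display_py format_critical_path_for_display_py_alt
  simp only
  rw [pv_foldA]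
  have hA := pv_core text.toList text.toList 0 '\x00' (by simp) (by decide) (by omega)
  simp only [Nat.cast_zero] at hA
  rw [hA]
  have hB := pv_main text.toList '\x00' (by rintro ⟨h, _⟩; exact absurd h (by decide))
  rw [pv_splitOn_eq]
  rw [show (fun p => pvBreakAfter (pvBreakAfter (pvBreakAfter p '>') ',') ')')
        = (fun p : List Char => p.flatMap pvF3) from funext pv_three_eq]
  rw [hB]
  simp
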